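-- pv_equiv track=rewrite | github.com/ulysseherbach/harissa | harissa/automodel/utils.py | map_theta
-- ===== SOURCE A (Python) =====
-- def map_theta(G):
--     """Build the dictionary {k: (i,j)} for k = 0, ..., G*(G+1)/2 - 1
--     corresponding to the relevant entries of matrix theta
--     ordered by lexicographic order"""
--     l = {}
--     k = 0
--     for i in range(G):
--         for j in range(i,G):
--             l[k] = (i,j)
--             k += 1
--     return l
-- ===== SOURCE B (Python) =====
-- def map_theta(G):
--     """Single flat loop over all G*(G+1)//2 keys, tracking the
--     upper-triangular coordinates (i, j) incrementally."""
--     n = max(G, 0)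
--     l = {}
--     i = j = 0
--     for k in range(n * (n + 1) // 2):
--         l[k] = (i, j)
--         if j == G - 1:
--             i += 1
--             j = i
--         else:
--             j += 1
--     return l
-- ===== Notes on version B (the rewrite author's own statement) =====
-- stated objective: alternative
-- what changed: Replaces A's nested row/column loops with a single flat loop over the whole triangular index range that tracks the upper-triangular coordinates incrementally, advancing to the next row at each row boundary.
import Mathlib
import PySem

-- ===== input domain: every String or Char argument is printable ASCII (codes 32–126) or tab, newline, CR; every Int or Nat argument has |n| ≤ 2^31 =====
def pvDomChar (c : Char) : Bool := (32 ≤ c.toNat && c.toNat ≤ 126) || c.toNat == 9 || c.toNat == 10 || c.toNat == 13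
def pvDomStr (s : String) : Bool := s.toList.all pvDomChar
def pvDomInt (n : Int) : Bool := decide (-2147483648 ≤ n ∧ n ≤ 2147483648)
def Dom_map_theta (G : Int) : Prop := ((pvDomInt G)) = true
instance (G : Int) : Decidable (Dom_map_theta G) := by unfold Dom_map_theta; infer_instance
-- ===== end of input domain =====

-- B replaces A's nested loops by one flat loop over the whole triangular key range that
-- tracks the (i,j) coordinates incrementally (objective: alternative decomposition, same cost).

-- ===== PORT A =====
def map_theta (G : Int) : List (Int × Int × Int) :=
  ((PySem.List.pyRange 0 G 1).foldl
    (fun (s : PySem.Dict Int (Int × Int) × Int) i =>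
      (PySem.List.pyRange i G 1).foldl
        (fun (t : PySem.Dict Int (Int × Int) × Int) j =>
          (t.1.insert t.2 (i, j), t.2 + 1)) s)
    (PySem.Dict.empty, 0)).1.items

-- ===== PORT B =====
def map_theta_alt (G : Int) : List (Int × Int × Int) :=
  ((PySem.List.pyRange 0 (PySem.Int.floordiv (max G 0 * (max G 0 + 1)) 2) 1).foldl
    (fun (s : PySem.Dict Int (Int × Int) × Int × Int) k =>
      if s.2.2 == G - 1 then (s.1.insert k (s.2.1, s.2.2), s.2.1 + 1, s.2.1 + 1)
      else (s.1.insert k (s.2.1, s.2.2), s.2.1, s.2.2 + 1))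
    (PySem.Dict.empty, 0, 0)).1.items

-- ===== PRECONDITION & SPEC =====
def Spec_map_theta (G : Int) (out : List (Int × Int × Int)) : Prop := out = map_theta_alt G
instance (G : Int) (out : List (Int × Int × Int)) : Decidable (Spec_map_theta G out) := by unfold Spec_map_theta; infer_instance

-- ===== CLAIM (what is proved, stated in full; the proofs are below) =====
def Claim_equal_map_theta : Prop := ∀ (G : Int), Dom_map_theta G → Spec_map_theta G (map_theta G)

-- ===== LEMMAS AND PROOFS =====

-- one row of the triangle: keys k, k+1, … paired with (i, j) for j = i, …, G-1
def rowSpec (G i k : Int) : List (Int × Int × Int) :=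
  (PySem.List.enumerate (PySem.List.pyRange i G 1) k).map (fun q => (q.1, i, q.2))

-- m rows starting at row i with first key k
def triSpec (G : Int) : Nat → Int → Int → List (Int × Int × Int)
  | 0, _, _ => []
  | (m+1), i, k => rowSpec G i k ++ triSpec G m (i+1) (k + (G - i))

-- number of entries in m final rows (row lengths m, m-1, …, 1)
def tn : Nat → Nat
  | 0 => 0
  | (m+1) => (m+1) + tn m

lemma two_tn (m : Nat) : 2 * (tn m : Int) = (m : Int) * (m + 1) := by
  induction m with
  | zero => simp [tn]
  | succ m ih => simp only [tn]; push_cast; push_cast at ih; ring_nf; ring_nf at ih; omega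

lemma mem_rowSpec_key_lt (G i j k : Int) (p : Int × Int × Int)
    (hp : p ∈ (PySem.List.enumerate (PySem.List.pyRange j G 1) k).map (fun q => (q.1, i, q.2))) :
    p.1 < k + ((G - j).toNat : Int) := by
  rcases List.mem_map.1 hp with ⟨q, hq, rfl⟩
  rcases (PySem.List.mem_enumerate_iff _ _ _).1 hq with ⟨t, ht, rfl⟩
  simp only [PySem.List.length_pyRange_one] at ht
  simp only []
  omega

lemma mk_insert_fresh (d : List (Int × Int × Int)) (k : Int) (v : Int × Int)
    (hk : ∀ p ∈ d, p.1 < k) :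
    (PySem.Dict.mk d).insert k v = PySem.Dict.mk (d ++ [(k, v)]) := by
  have hc : (PySem.Dict.mk d).contains k = false := by
    rw [Bool.eq_false_iff]
    intro hc
    have := (PySem.Dict.contains_iff_mem_keys _ _).1 hc
    rw [PySem.Dict.keys_mk] at this
    rcases List.mem_map.1 this with ⟨p, hp, hpk⟩
    have := hk p hp
    omega
  apply PySem.Dict.ext
  rw [PySem.Dict.items_insert_of_not_contains _ _ hc]

-- A's inner loop appends one enumerated row
lemma A_inner (i : Int) (js : List Int) : ∀ (k : Int) (d : List (Int × Int × Int)),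
    (∀ p ∈ d, p.1 < k) →
    js.foldl (fun (t : PySem.Dict Int (Int × Int) × Int) j => (t.1.insert t.2 (i, j), t.2 + 1))
      (PySem.Dict.mk d, k)
    = (PySem.Dict.mk (d ++ (PySem.List.enumerate js k).map (fun q => (q.1, i, q.2))),
       k + (js.length : Int)) := by
  induction js with
  | nil => intro k d _; simp [PySem.List.enumerate]
  | cons j js ih =>
    intro k d hk
    simp only [List.foldl_cons]
    rw [mk_insert_fresh d k (i, j) hk]
    rw [ih (k + 1) (d ++ [(k, i, j)]) (by
      intro p hp
      rcases List.mem_append.1 hp with h | h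
      · have := hk p h; omega
      · simp at h; subst h; simp)]
    rw [PySem.List.enumerate_cons]
    simp only [List.map_cons, List.length_cons]
    rw [List.append_assoc]
    simp only [List.singleton_append]
    rw [show k + 1 + (js.length : Int) = k + ((js.length + 1 : Nat) : Int) by push_cast; ring]

-- A's outer loop over the last m rows
lemma A_outer (G : Int) : ∀ (m : Nat) (i k : Int) (d : List (Int × Int × Int)),
    i = G - m → (∀ p ∈ d, p.1 < k) →
    (PySem.List.pyRange i G 1).foldl
      (fun (s : PySem.Dict Int (Int × Int) × Int) i' =>
        (PySem.List.pyRange i' G 1).foldl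
          (fun (t : PySem.Dict Int (Int × Int) × Int) j =>
            (t.1.insert t.2 (i', j), t.2 + 1)) s)
      (PySem.Dict.mk d, k)
    = (PySem.Dict.mk (d ++ triSpec G m i k), k + (tn m : Int)) := by
  intro m
  induction m with
  | zero =>
    intro i k d hi _
    have : G ≤ i := by omega
    rw [PySem.List.pyRange_one_eq_nil this]
    simp [triSpec, tn]
  | succ m ih =>
    intro i k d hi hk
    have hiG : i < G := by omega
    rw [PySem.List.pyRange_one_cons hiG]
    simp only [List.foldl_cons]
    rw [A_inner i (PySem.List.pyRange i G 1) k d hk]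
    have hrow : (G - i).toNat = m + 1 := by omega
    rw [ih (i + 1) (k + ((PySem.List.pyRange i G 1).length : Int))
        (d ++ (PySem.List.enumerate (PySem.List.pyRange i G 1) k).map (fun q => (q.1, i, q.2)))
        (by omega)
        (by
          intro p hp
          rcases List.mem_append.1 hp with h | h
          · have := hk p h
            simp only [PySem.List.length_pyRange_one]
            omega
          · have := mem_rowSpec_key_lt G i i k p h
            simp only [PySem.List.length_pyRange_one]
            omega)]
    simp only [PySem.List.length_pyRange_one, hrow, triSpec, rowSpec, tn]
    rw [List.append_assoc]
    rw [show G - i = ((m + 1 : Nat) : Int) by push_cast; omega,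
        show k + ((m + 1 : Nat) : Int) + ((tn m : Nat) : Int) = k + ((m + 1 + tn m : Nat) : Int)
          by push_cast; ring]

-- B's loop over one row: m+1 entries, j runs from G-(m+1) to G-1
lemma B_row (G i : Int) : ∀ (m : Nat) (j k : Int) (d : List (Int × Int × Int)),
    j = G - ((m : Int) + 1) → (∀ p ∈ d, p.1 < k) →
    (PySem.List.pyRange k (k + ((m : Int) + 1)) 1).foldl
      (fun (s : PySem.Dict Int (Int × Int) × Int × Int) k' =>
        if s.2.2 == G - 1 then (s.1.insert k' (s.2.1, s.2.2), s.2.1 + 1, s.2.1 + 1)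
        else (s.1.insert k' (s.2.1, s.2.2), s.2.1, s.2.2 + 1))
      (PySem.Dict.mk d, i, j)
    = (PySem.Dict.mk
        (d ++ (PySem.List.enumerate (PySem.List.pyRange j G 1) k).map (fun q => (q.1, i, q.2))),
       i + 1, i + 1) := by
  intro m
  induction m with
  | zero =>
    intro j k d hj hk
    have h1 : PySem.List.pyRange k (k + ((0:Nat) + 1)) 1 = [k] := by
      push_cast
      exact PySem.List.pyRange_one_singleton k
    rw [h1]
    simp only [List.foldl_cons, List.foldl_nil]
    have hjj : (j == G - 1) = true := by simp; omega
    simp only [hjj, if_true]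
    rw [mk_insert_fresh d k (i, j) hk]
    have h2 : PySem.List.pyRange j G 1 = [j] := by
      have : G = j + 1 := by omega
      rw [this]
      exact PySem.List.pyRange_one_singleton j
    rw [h2, PySem.List.enumerate_cons]
    simp [PySem.List.enumerate]
  | succ m ih =>
    intro j k d hj hk
    have hcons : PySem.List.pyRange k (k + ((m + 1 : Nat) + 1)) 1
        = k :: PySem.List.pyRange (k + 1) (k + ((m + 1 : Nat) + 1)) 1 :=
      PySem.List.pyRange_one_cons (by push_cast; omega)
    rw [hcons]
    simp only [List.foldl_cons]
    have hjj : (j == G - 1) = false := by simp; push_cast at hj; omega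
    simp only [hjj, Bool.false_eq_true, if_false]
    rw [mk_insert_fresh d k (i, j) hk]
    have hmid : k + ((m + 1 : Nat) + 1) = (k + 1) + ((m : Int) + 1) := by push_cast; ring
    rw [hmid]
    rw [ih (j + 1) (k + 1) (d ++ [(k, i, j)])
        (by push_cast at hj ⊢; omega)
        (by
          intro p hp
          rcases List.mem_append.1 hp with h | h
          · have := hk p h; omega
          · simp at h; subst h; simp)]
    have hd : PySem.List.pyRange j G 1 = j :: PySem.List.pyRange (j + 1) G 1 :=
      PySem.List.pyRange_one_cons (by push_cast at hj; omega)
    rw [hd, PySem.List.enumerate_cons]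
    simp only [List.map_cons]
    rw [List.append_assoc]
    rfl

-- B's loop over the last m rows
lemma B_outer (G : Int) : ∀ (m : Nat) (i k : Int) (d : List (Int × Int × Int)),
    i = G - m → (∀ p ∈ d, p.1 < k) →
    (PySem.List.pyRange k (k + (tn m : Int)) 1).foldl
      (fun (s : PySem.Dict Int (Int × Int) × Int × Int) k' =>
        if s.2.2 == G - 1 then (s.1.insert k' (s.2.1, s.2.2), s.2.1 + 1, s.2.1 + 1)
        else (s.1.insert k' (s.2.1, s.2.2), s.2.1, s.2.2 + 1))
      (PySem.Dict.mk d, i, i)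
    = (PySem.Dict.mk (d ++ triSpec G m i k), G, G) := by
  intro m
  induction m with
  | zero =>
    intro i k d hi _
    simp only [tn, Nat.cast_zero, add_zero]
    rw [PySem.List.pyRange_one_eq_nil (le_refl k)]
    simp only [List.foldl_nil, triSpec, List.append_nil]
    rw [hi]
    norm_num
  | succ m ih =>
    intro i k d hi hk
    have hsplit : PySem.List.pyRange k (k + (tn (m+1) : Int)) 1
        = PySem.List.pyRange k (k + ((m : Int) + 1)) 1
          ++ PySem.List.pyRange (k + ((m : Int) + 1)) (k + (tn (m+1) : Int)) 1 := by
      apply PySem.List.pyRange_one_append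
      · omega
      · simp only [tn]; push_cast; omega
    rw [hsplit, List.foldl_append]
    rw [B_row G i m i k d (by omega) hk]
    have htail : k + (tn (m+1) : Int) = (k + ((m : Int) + 1)) + (tn m : Int) := by
      simp only [tn]; push_cast; ring
    rw [htail]
    rw [ih (i + 1) (k + ((m : Int) + 1))
        (d ++ (PySem.List.enumerate (PySem.List.pyRange i G 1) k).map (fun q => (q.1, i, q.2)))
        (by omega)
        (by
          intro p hp
          rcases List.mem_append.1 hp with h | h
          · have := hk p h; omega
          · have := mem_rowSpec_key_lt G i i k p h
            have : (G - i).toNat = m + 1 := by omega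
            omega)]
    simp only [triSpec, rowSpec]
    rw [List.append_assoc]
    have : k + (G - i) = k + ((m : Int) + 1) := by omega
    rw [this]

lemma floordiv_tri (G : Int) (hG : 0 < G) :
    PySem.Int.floordiv (G * (G + 1)) 2 = (tn G.toNat : Int) := by
  rw [PySem.Int.floordiv_eq_iff_of_pos (by norm_num)]
  have h2 := two_tn G.toNat
  have : ((G.toNat : Int)) = G := by omega
  rw [this] at h2
  omega

-- ===== VERDICT (by name: the statement is the Claim_ definition above) =====
theorem map_theta_spec : Claim_equal_map_theta := by
  intro G _
  unfold Spec_map_theta map_theta map_theta_alt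
  by_cases hG : 0 < G
  · have hmax : max G 0 = G := by omega
    rw [hmax]
    rw [floordiv_tri G hG]
    have h0 : (0 : Int) = G - (G.toNat : Int) := by omega
    have hA := A_outer G G.toNat 0 0 [] (by omega) (by simp)
    have hB := B_outer G G.toNat 0 0 [] (by omega) (by simp)
    simp only [zero_add] at hB
    rw [show (PySem.Dict.empty : PySem.Dict Int (Int × Int)) = PySem.Dict.mk [] from rfl]
    rw [hA, hB]
  · have hmax : max G 0 = 0 := by omega
    rw [hmax]
    rw [show PySem.Int.floordiv (0 * (0 + 1)) 2 = 0 from rfl]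
    rw [PySem.List.pyRange_one_eq_nil (by omega : G ≤ 0),
        PySem.List.pyRange_one_eq_nil (by omega : (0:Int) ≤ 0)]
    rfl
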